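-- pv_equiv track=rewrite | github.com/artem-tkachuk/Algorithms | python/codeSignal/numContigSubarrWith2SumEqk.py | solution
-- ===== SOURCE A (Python) =====
-- def solution(a, m, k):
--     n = len(a)
--
--     count = 0
--     i = 0
--
--     while i <= n - m:
--         found = False
--
--         nums_in_window = {
--             a[i]: i
--         }
--
--         for j in range(i + 1, i + m):
--
--             complement = k - a[j]
--
--             if complement in nums_in_window:
--                 bound = min(n - m, nums_in_window[complement])
--                 count += (bound - i + 1)
--                 i = bound + 1
--                 found = True
--                 break
--             else:
--                 nums_in_window[a[j]] = j
--
--         if not found: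
--             i += 1
--
--     return count
-- ===== SOURCE B (Python) =====
-- def solution(a, m, k):
--     n = len(a)
--     if m > n:
--         return 0
--     freq = {}
--     pairs = 0
--     for j in range(m):
--         pairs += freq.get(k - a[j], 0)
--         freq[a[j]] = freq.get(a[j], 0) + 1
--     count = 1 if pairs > 0 else 0
--     for s in range(1, n - m + 1):
--         v = a[s - 1]
--         freq[v] -= 1
--         pairs -= freq.get(k - v, 0)
--         w = a[s + m - 1]
--         pairs += freq.get(k - w, 0)
--         freq[w] = freq.get(w, 0) + 1
--         if pairs > 0:
--             count += 1
--     return count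
-- ===== Notes on version B (the rewrite author's own statement) =====
-- stated objective: faster
-- what changed: Replaced A's restart-and-rescan greedy (rebuilding a value->index dict from each window start and jump-skipping after a hit) by a single fixed-size sliding window that maintains a frequency dict and an incrementally updated count of pairs summing to k, counting a window when that count is positive.
-- outside the precondition, e.g. on solution([1, 2], 0, 3): A raises IndexError, B raises KeyError
import Mathlib
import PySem

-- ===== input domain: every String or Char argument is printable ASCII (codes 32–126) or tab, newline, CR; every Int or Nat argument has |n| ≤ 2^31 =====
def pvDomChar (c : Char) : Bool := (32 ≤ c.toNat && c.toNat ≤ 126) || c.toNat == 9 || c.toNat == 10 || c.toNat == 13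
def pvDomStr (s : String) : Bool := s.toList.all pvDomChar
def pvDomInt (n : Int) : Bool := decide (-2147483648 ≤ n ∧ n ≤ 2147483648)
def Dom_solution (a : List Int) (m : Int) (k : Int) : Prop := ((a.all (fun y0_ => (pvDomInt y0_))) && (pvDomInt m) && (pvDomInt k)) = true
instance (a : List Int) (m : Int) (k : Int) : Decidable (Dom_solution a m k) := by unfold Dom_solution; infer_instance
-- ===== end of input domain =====

-- B replaces A's restart-and-rescan greedy by a single O(n) sliding window with a
-- frequency dict and an incrementally maintained pair count (return value only; no mutation).

-- ===== PORT A =====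
-- inner 'for j in range(i+1, i+m)' scan with the value->index dict; returns the bound on a hit, none if the loop falls through
def scanA (a : List Int) (m k i : Int) (d : PySem.Dict Int Int) (j : Int) : Option Int :=
  if h : j < i + m then
    let complement := k - PySem.List.pyGetD a j 0
    match d.get? complement with
    | some jp => some (min ((a.length : Int) - m) jp)
    | none => scanA a m k i (d.insert (PySem.List.pyGetD a j 0) j) (j + 1)
  else none
termination_by (i + m - j).toNat
decreasing_by omega

-- the outer 'while i <= n - m' loop; fuel bounds the number of iterations (i strictly increases in every real run)
def loopA (a : List Int) (m k : Int) : Nat → Int → Int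
  | 0, _ => 0
  | fuel + 1, i =>
    if i ≤ (a.length : Int) - m then
      match scanA a m k i ((PySem.Dict.empty).insert (PySem.List.pyGetD a i 0) i) (i + 1) with
      | some bound => (bound - i + 1) + loopA a m k fuel (bound + 1)
      | none => loopA a m k fuel (i + 1)
    else 0

def solution (a : List Int) (m : Int) (k : Int) : Int :=
  loopA a m k ((a.length : Int) - m + 1).toNat 0

-- ===== PORT B =====
def solution_alt (a : List Int) (m : Int) (k : Int) : Int :=
  let n : Int := a.length
  if m > n then 0
  else
    let st1 := (PySem.List.pyRange 0 m 1).foldl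
      (fun (st : PySem.Dict Int Int × Int) j =>
        let aj := PySem.List.pyGetD a j 0
        (st.1.insert aj (st.1.getD aj 0 + 1), st.2 + st.1.getD (k - aj) 0))
      (PySem.Dict.empty, 0)
    let count0 : Int := if st1.2 > 0 then 1 else 0
    let fin := (PySem.List.pyRange 1 (n - m + 1) 1).foldl
      (fun (st : PySem.Dict Int Int × Int × Int) s =>
        let v := PySem.List.pyGetD a (s - 1) 0
        let freq1 := st.1.insert v (st.1.getD v 0 - 1)
        let pairs1 := st.2.1 - freq1.getD (k - v) 0
        let w := PySem.List.pyGetD a (s + m - 1) 0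
        let pairs2 := pairs1 + freq1.getD (k - w) 0
        let freq2 := freq1.insert w (freq1.getD w 0 + 1)
        (freq2, pairs2, st.2.2 + (if pairs2 > 0 then 1 else 0)))
      (st1.1, st1.2, count0)
    fin.2.2

-- ===== PRECONDITION & SPEC =====
-- Pre_ excludes m ≤ 0, on which A raises IndexError (a[i] is evaluated for i up to and past len(a)).
def Pre_solution (a : List Int) (m : Int) (k : Int) : Prop := 1 ≤ m
instance (a : List Int) (m : Int) (k : Int) : Decidable (Pre_solution a m k) := by unfold Pre_solution; infer_instance
def pvWitness_solution : List Int × Int × Int := ([1, 2, 3, 1], 2, 3)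

def Spec_solution (a : List Int) (m : Int) (k : Int) (out : Int) : Prop := out = solution_alt a m k
instance (a : List Int) (m : Int) (k : Int) (out : Int) : Decidable (Spec_solution a m k out) := by unfold Spec_solution; infer_instance

-- ===== CLAIM (what is proved, stated in full; the proofs are below) =====
def Claim_equal_solution : Prop := ∀ (a : List Int) (m : Int) (k : Int), Dom_solution a m k → Pre_solution a m k → Spec_solution a m k (solution a m k)

-- ===== LEMMAS AND PROOFS =====

-- the window of length m starting at s
def win (a : List Int) (m s : Nat) : List Int := (a.drop s).take m

-- does the list contain a pair (two positions) summing to k?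
def hasPairB (k : Int) : List Int → Bool
  | [] => false
  | v :: w => (w.contains (k - v)) || hasPairB k w

-- number of pairs of positions summing to k
def pc (k : Int) : List Int → Nat
  | [] => 0
  | v :: w => w.count (k - v) + pc k w

lemma pc_append_singleton (k x : Int) (w : List Int) :
    pc k (w ++ [x]) = pc k w + w.count (k - x) := by
  induction w with
  | nil => simp [pc]
  | cons v w ih =>
      simp only [List.cons_append, pc, ih, List.count_append, List.count_cons,
        List.count_nil, beq_iff_eq]
      split_ifs <;> omega

lemma pc_pos_iff (k : Int) (w : List Int) : 0 < pc k w ↔ hasPairB k w = true := by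
  induction w with
  | nil => simp [pc, hasPairB]
  | cons v w ih =>
      simp only [pc, hasPairB, Bool.or_eq_true, ← ih, List.contains_eq_mem, decide_eq_true_eq,
        ← List.count_pos_iff]
      omega

lemma hasPairB_iff (k : Int) (w : List Int) :
    hasPairB k w = true ↔ ∃ p q : Nat, ∃ _ : p < q, ∃ hq : q < w.length, w[p]'(by omega) + w[q] = k := by
  induction w with
  | nil => simp [hasPairB]
  | cons v w ih =>
      simp only [hasPairB, Bool.or_eq_true, List.contains_eq_mem, decide_eq_true_eq]
      constructor
      · rintro (hmem | hp)
        · obtain ⟨q, hq, hval⟩ := List.mem_iff_getElem.mp hmem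
          exact ⟨0, q + 1, by omega, by simpa using hq, by simpa using by omega⟩
        · obtain ⟨p, q, hpq, hq, hval⟩ := ih.mp hp
          exact ⟨p + 1, q + 1, by omega, by simpa using hq, by simpa using hval⟩
      · rintro ⟨p, q, hpq, hq, hval⟩
        match p, q with
        | 0, q + 1 =>
            left
            apply List.mem_iff_getElem.mpr
            refine ⟨q, by simpa using hq, ?_⟩
            simp only [List.getElem_cons_zero, List.getElem_cons_succ] at hval
            omega
        | p + 1, q + 1 =>
            right
            exact ih.mpr ⟨p, q, by omega, by simpa using hq, by simpa using hval⟩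

lemma win_length (a : List Int) (m s : Nat) (h : s + m ≤ a.length) :
    (win a m s).length = m := by
  simp [win]; omega

lemma win_getElem (a : List Int) (m s t : Nat) (ht : t < m) (h : s + m ≤ a.length) :
    ∃ hw : t < (win a m s).length, ∃ ha : s + t < a.length, (win a m s)[t]'hw = a[s + t]'ha := by
  have hw : t < (win a m s).length := by rw [win_length a m s h]; exact ht
  refine ⟨hw, by omega, ?_⟩
  simp [win, List.getElem_take, List.getElem_drop]

-- pair inside a full window ⇒ the window has a pair
lemma hasPair_of_indices (a : List Int) (m s : Nat) (k : Int) (h : s + m ≤ a.length)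
    (x y : Nat) (hsx : s ≤ x) (hxy : x < y) (hym : y < s + m)
    (hy : y < a.length) (hsum : a[x]'(by omega) + a[y]'hy = k) :
    hasPairB k (win a m s) = true := by
  apply (hasPairB_iff k (win a m s)).mpr
  obtain ⟨hw1, ha1, he1⟩ := win_getElem a m s (x - s) (by omega) h
  obtain ⟨hw2, ha2, he2⟩ := win_getElem a m s (y - s) (by omega) h
  refine ⟨x - s, y - s, by omega, hw2, ?_⟩
  rw [he1, he2]
  have hx' : s + (x - s) = x := by omega
  have hy' : s + (y - s) = y := by omega
  simp_rw [hx', hy']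
  exact hsum

-- scanA: soundness of a hit and of a miss, under the dict invariants
lemma scanA_spec (a : List Int) (mN iN : Nat) (k : Int) (him : iN + mN ≤ a.length) :
    ∀ F jN (d : PySem.Dict Int Int), iN + mN = jN + F → iN < jN →
    (∀ v : Int, d.contains v = true ↔ ∃ t : Nat, iN ≤ t ∧ t < jN ∧ ∃ h : t < a.length, a[t]'h = v) →
    (∀ v jp, d.get? v = some jp → ∃ t : Nat, jp = (t : Int) ∧ iN ≤ t ∧ t < jN ∧ ∃ h : t < a.length, a[t]'h = v) →
    (∀ bound, scanA a mN k iN d jN = some bound →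
        (iN : Int) ≤ bound ∧ bound ≤ (a.length : Int) - mN ∧
        ∀ sN : Nat, iN ≤ sN → (sN : Int) ≤ bound → hasPairB k (win a mN sN) = true) ∧
    (scanA a mN k iN d jN = none →
        ∀ x y : Nat, iN ≤ x → x < y → jN ≤ y → y < iN + mN →
          ∀ (hx : x < a.length) (hy : y < a.length), a[x]'hx + a[y]'hy ≠ k) := by
  intro F
  induction F with
  | zero =>
      intro jN d hF hij hcont hget
      constructor
      · intro bound hb
        rw [scanA, dif_neg (by omega)] at hb
        exact absurd hb (by simp)
      · intro _ x y _ _ hjy hym _ _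
        omega
  | succ F ih =>
      intro jN d hF hij hcont hget
      have hjlen : jN < a.length := by omega
      have hjm : (jN : Int) < (iN : Int) + (mN : Int) := by omega
      have hpg : PySem.List.pyGetD a (jN : Int) 0 = a[jN]'hjlen := by
        rw [PySem.List.pyGetD_natCast, List.getD_eq_getElem?_getD, List.getElem?_eq_getElem hjlen]
        rfl
      rw [scanA, dif_pos hjm]
      simp only [hpg]
      cases hdg : d.get? (k - a[jN]'hjlen) with
      | some jp =>
          obtain ⟨t, hjt, hit, htj, htlen, htval⟩ := hget _ _ hdg
          constructor
          · intro bound hb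
            simp only at hb
            injection hb with hb
            have hbt : bound = min ((a.length : Int) - (mN : Int)) (t : Int) := by
              rw [← hb, hjt]
            refine ⟨by omega, by omega, ?_⟩
            intro sN hisN hsb
            rw [hbt] at hsb
            have hsb' : sN ≤ t ∧ (sN : Int) ≤ (a.length : Int) - (mN : Int) := by
              constructor <;> omega
            apply hasPair_of_indices a mN sN k (by omega) t jN (hsb'.1) htj (by omega) hjlen
            rw [htval]; omega
          · intro hb
            simp only at hb
            exact absurd hb (by simp)
      | none =>
          simp only
          have hcast : (jN : Int) + 1 = ((jN + 1 : Nat) : Int) := by omega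
          rw [hcast]
          have hcont' : ∀ v : Int, (d.insert (a[jN]'hjlen) (jN : Int)).contains v = true ↔
              ∃ t : Nat, iN ≤ t ∧ t < jN + 1 ∧ ∃ h : t < a.length, a[t]'h = v := by
            intro v
            rw [PySem.Dict.contains_insert]
            constructor
            · intro hv
              rcases Bool.or_eq_true_iff.mp hv with hv | hv
              · exact ⟨jN, by omega, by omega, hjlen, (beq_iff_eq.mp hv).symm⟩
              · obtain ⟨t, h1, h2, h3, h4⟩ := (hcont v).mp hv
                exact ⟨t, h1, by omega, h3, h4⟩
            · rintro ⟨t, h1, h2, h3, h4⟩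
              by_cases ht : t = jN
              · subst ht; simp [← h4]
              · exact Bool.or_eq_true_iff.mpr (Or.inr ((hcont v).mpr ⟨t, h1, by omega, h3, h4⟩))
          have hget' : ∀ (v jp : Int), (d.insert (a[jN]'hjlen) (jN : Int)).get? v = some jp →
              ∃ t : Nat, jp = (t : Int) ∧ iN ≤ t ∧ t < jN + 1 ∧ ∃ h : t < a.length, a[t]'h = v := by
            intro v jp hv
            rw [PySem.Dict.get?_insert] at hv
            split_ifs at hv with hveq
            · injection hv with hv
              exact ⟨jN, hv.symm, by omega, by omega, hjlen, hveq.symm⟩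
            · obtain ⟨t, h1, h2, h3, h4⟩ := hget v jp hv
              exact ⟨t, h1, h2, by omega, h4⟩
          have hih := ih (jN + 1) (d.insert (a[jN]'hjlen) (jN : Int)) (by omega) (by omega) hcont' hget'
          refine ⟨hih.1, ?_⟩
          intro hb x y hx1 hx2 hjy hym hxl hyl
          by_cases hyj : y = jN
          · subst hyj
            intro hsum
            have hcy : d.contains (k - a[y]'hyl) = true :=
              (hcont _).mpr ⟨x, hx1, by omega, hxl, by omega⟩
            rw [PySem.Dict.contains_eq_isSome_get?, hdg] at hcy
            simp at hcy
          · exact hih.2 hb x y hx1 hx2 (by omega) hym hxl hyl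

-- one full iteration of A's while loop: scanA from the start state
lemma scanA_start (a : List Int) (mN iN : Nat) (k : Int) (hm : 1 ≤ mN) (him : iN + mN ≤ a.length) :
    (∀ bound, scanA a mN k iN ((PySem.Dict.empty).insert (PySem.List.pyGetD a iN 0) iN) (iN + 1) = some bound →
        (iN : Int) ≤ bound ∧ bound ≤ (a.length : Int) - mN ∧
        ∀ sN : Nat, iN ≤ sN → (sN : Int) ≤ bound → hasPairB k (win a mN sN) = true) ∧
    (scanA a mN k iN ((PySem.Dict.empty).insert (PySem.List.pyGetD a iN 0) iN) (iN + 1) = none →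
        hasPairB k (win a mN iN) = false) := by
  have hilen : iN < a.length := by omega
  have hpg : PySem.List.pyGetD a (iN : Int) 0 = a[iN]'hilen := by
    rw [PySem.List.pyGetD_natCast, List.getD_eq_getElem?_getD, List.getElem?_eq_getElem hilen]
    rfl
  have hcast : (iN : Int) + 1 = ((iN + 1 : Nat) : Int) := by omega
  have hcont0 : ∀ v : Int,
      ((PySem.Dict.empty).insert (a[iN]'hilen) (iN : Int)).contains v = true ↔
      ∃ t : Nat, iN ≤ t ∧ t < iN + 1 ∧ ∃ h : t < a.length, a[t]'h = v := by
    intro v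
    rw [PySem.Dict.contains_insert]
    simp only [PySem.Dict.contains_empty, Bool.or_false, beq_iff_eq]
    constructor
    · intro hv; exact ⟨iN, by omega, by omega, hilen, hv.symm⟩
    · rintro ⟨t, h1, h2, h3, h4⟩
      have : t = iN := by omega
      subst this; exact h4.symm
  have hget0 : ∀ (v jp : Int),
      ((PySem.Dict.empty).insert (a[iN]'hilen) (iN : Int)).get? v = some jp →
      ∃ t : Nat, jp = (t : Int) ∧ iN ≤ t ∧ t < iN + 1 ∧ ∃ h : t < a.length, a[t]'h = v := by
    intro v jp hv
    rw [PySem.Dict.get?_insert] at hv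
    split_ifs at hv with hveq
    · injection hv with hv
      exact ⟨iN, hv.symm, by omega, by omega, hilen, hveq.symm⟩
    · rw [PySem.Dict.get?_empty] at hv; exact absurd hv (by simp)
  have hspec := scanA_spec a mN iN k him (mN - 1) (iN + 1)
      ((PySem.Dict.empty).insert (a[iN]'hilen) (iN : Int)) (by omega) (by omega) hcont0 hget0
  rw [hpg, hcast]
  refine ⟨hspec.1, ?_⟩
  intro hb
  by_contra hp
  have hp' : hasPairB k (win a mN iN) = true := by
    cases h : hasPairB k (win a mN iN) with
    | false => exact absurd h hp
    | true => rfl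
  obtain ⟨p, q, hpq, hq, hval⟩ := (hasPairB_iff k (win a mN iN)).mp hp'
  rw [win_length a mN iN him] at hq
  obtain ⟨hw1, ha1, he1⟩ := win_getElem a mN iN p (by omega) him
  obtain ⟨hw2, ha2, he2⟩ := win_getElem a mN iN q (by omega) him
  rw [he1, he2] at hval
  exact hspec.2 hb (iN + p) (iN + q) (by omega) (by omega) (by omega) (by omega) ha1 ha2 hval

lemma loopA_spec (a : List Int) (mN : Nat) (k : Int) (hm : 1 ≤ mN) :
    ∀ fuel iN : Nat, a.length + 1 - mN - iN ≤ fuel →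
    loopA a mN k fuel iN =
      ((List.range' iN (a.length + 1 - mN - iN)).countP (fun s => hasPairB k (win a mN s)) : Int) := by
  intro fuel
  induction fuel with
  | zero =>
      intro iN hf
      have h0 : a.length + 1 - mN - iN = 0 := by omega
      rw [h0]
      simp [loopA]
  | succ fuel ih =>
      intro iN hf
      rw [loopA]
      by_cases hcond : (iN : Int) ≤ (a.length : Int) - (mN : Int)
      · rw [if_pos hcond]
        have him : iN + mN ≤ a.length := by omega
        have hstart := scanA_start a mN iN k hm him
        cases hscan : scanA a mN k iN ((PySem.Dict.empty).insert (PySem.List.pyGetD a iN 0) iN) (iN + 1) with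
        | some bound =>
            obtain ⟨h1, h2, h3⟩ := hstart.1 bound hscan
            simp only
            set bN := bound.toNat with hbN
            have hbound : (bN : Int) = bound := by omega
            have hc1 : bound + 1 = ((bN + 1 : Nat) : Int) := by push_cast; omega
            rw [hc1, ih (bN + 1) (by omega)]
            have hsplit : List.range' iN (a.length + 1 - mN - iN) =
                List.range' iN (bN + 1 - iN) ++ List.range' (bN + 1) (a.length + 1 - mN - (bN + 1)) := by
              have h4 : iN ≤ bN := by omega
              have := List.range'_append (s := iN) (m := bN + 1 - iN)
                (n := a.length + 1 - mN - (bN + 1)) (step := 1)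
              rw [show iN + 1 * (bN + 1 - iN) = bN + 1 by omega] at this
              rw [show a.length + 1 - mN - iN = (bN + 1 - iN) + (a.length + 1 - mN - (bN + 1)) by
                omega]
              rw [← this]
            rw [hsplit, List.countP_append]
            have hall : (List.range' iN (bN + 1 - iN)).countP (fun s => hasPairB k (win a mN s))
                = bN + 1 - iN := by
              have := (List.countP_eq_length (p := fun s => hasPairB k (win a mN s))
                  (l := List.range' iN (bN + 1 - iN))).mpr ?_
              · rw [this, List.length_range']
              · intro s hs
                rw [List.mem_range'_1] at hs
                exact h3 s (by omega) (by omega)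
            rw [hall]
            push_cast
            omega
        | none =>
            simp only
            have hc1 : (iN : Int) + 1 = ((iN + 1 : Nat) : Int) := by omega
            rw [hc1, ih (iN + 1) (by omega)]
            have hfalse := hstart.2 hscan
            have hlen : a.length + 1 - mN - iN = (a.length + 1 - mN - (iN + 1)) + 1 := by omega
            rw [hlen, List.range'_succ, List.countP_cons]
            simp [hfalse]
      · rw [if_neg hcond]
        have h0 : a.length + 1 - mN - iN = 0 := by omega
        rw [h0]
        simp

-- B side: the first loop's fold
lemma foldB1 (k : Int) (w : List Int) :
    ∀ (d : PySem.Dict Int Int) (p : Int) (c : List Int), (∀ v, d.getD v 0 = (c.count v : Int)) →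
    (∀ v, (w.foldl (fun st x => (st.1.insert x (st.1.getD x 0 + 1), st.2 + st.1.getD (k - x) 0)) (d, p)).1.getD v 0
        = ((c ++ w).count v : Int)) ∧
    (w.foldl (fun st x => (st.1.insert x (st.1.getD x 0 + 1), st.2 + st.1.getD (k - x) 0)) (d, p)).2
        = p + (pc k (c ++ w) : Int) - pc k c := by
  induction w with
  | nil =>
      intro d p c hd
      refine ⟨by simpa using hd, by simp⟩
  | cons x w ih =>
      intro d p c hd
      simp only [List.foldl_cons]
      have hd' : ∀ v, (d.insert x (d.getD x 0 + 1)).getD v 0 = ((c ++ [x]).count v : Int) := by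
        intro v
        rw [PySem.Dict.getD_insert]
        by_cases hv : v = x
        · subst hv
          simp [hd, List.count_append]
        · simp [hv, hd, List.count_append, show ¬ (x = v) from fun h => hv h.symm]
      obtain ⟨h1, h2⟩ := ih (d.insert x (d.getD x 0 + 1)) (p + d.getD (k - x) 0) (c ++ [x]) hd'
      constructor
      · intro v
        rw [h1 v, ← List.append_cons]
      · rw [h2, hd, ← List.append_cons, pc_append_singleton]
        push_cast
        ring

-- the body of B's second loop, named for the proofs (defeq to the lambda in solution_alt)
def Bstep (a : List Int) (m k : Int) : PySem.Dict Int Int × Int × Int → Int → PySem.Dict Int Int × Int × Int :=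
  fun st s =>
    let v := PySem.List.pyGetD a (s - 1) 0
    let freq1 := st.1.insert v (st.1.getD v 0 - 1)
    let pairs1 := st.2.1 - freq1.getD (k - v) 0
    let w := PySem.List.pyGetD a (s + m - 1) 0
    let pairs2 := pairs1 + freq1.getD (k - w) 0
    let freq2 := freq1.insert w (freq1.getD w 0 + 1)
    (freq2, pairs2, st.2.2 + (if pairs2 > 0 then 1 else 0))

lemma stepB (a : List Int) (m k : Int) (mN : Nat) (hm : 1 ≤ mN) (hmc : (mN : Int) = m)
    (u : Nat) (hu : u + 1 + mN ≤ a.length) (d : PySem.Dict Int Int) (p cnt : Int)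
    (hd : ∀ v, d.getD v 0 = (((win a mN u).count v : Nat) : Int))
    (hp : p = (pc k (win a mN u) : Int)) :
    (∀ x, (Bstep a m k (d, p, cnt) ((u + 1 : Nat) : Int)).1.getD x 0
        = (((win a mN (u + 1)).count x : Nat) : Int)) ∧
    (Bstep a m k (d, p, cnt) ((u + 1 : Nat) : Int)).2.1 = (pc k (win a mN (u + 1)) : Int) ∧
    (Bstep a m k (d, p, cnt) ((u + 1 : Nat) : Int)).2.2
        = cnt + (if hasPairB k (win a mN (u + 1)) then (1 : Int) else 0) := by
  have hulen : u < a.length := by omega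
  have humlen : u + mN < a.length := by omega
  set mid : List Int := (a.drop (u + 1)).take (mN - 1) with hmid
  have hwin_u : win a mN u = a[u]'hulen :: mid := by
    rw [win, List.drop_eq_getElem_cons hulen, show mN = (mN - 1) + 1 by omega,
      List.take_succ_cons]
  have hdropl : mN - 1 < (a.drop (u + 1)).length := by
    rw [List.length_drop]; omega
  have hgd : (a.drop (u + 1))[mN - 1]'hdropl = a[u + mN]'humlen := by
    rw [List.getElem_drop]
    congr 1
    omega
  have hwin_u1 : win a mN (u + 1) = mid ++ [a[u + mN]'humlen] := by
    rw [win, hmid, ← hgd, ← List.concat_eq_append, List.take_concat_get,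
      show mN - 1 + 1 = mN by omega]
  have hv : PySem.List.pyGetD a (((u + 1 : Nat) : Int) - 1) 0 = a[u]'hulen := by
    rw [show ((u + 1 : Nat) : Int) - 1 = ((u : Nat) : Int) by omega]
    rw [PySem.List.pyGetD_eq_getElem a 0 (by omega) (by omega)]
    simp
  have hw : PySem.List.pyGetD a (((u + 1 : Nat) : Int) + m - 1) 0 = a[u + mN]'humlen := by
    rw [PySem.List.pyGetD_eq_getElem a 0 (by push_cast; omega) (by push_cast; omega)]
    have h' : (((u + 1 : Nat) : Int) + m - 1).toNat = u + mN := by omega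
    simp only [h']
  simp only [Bstep, hv, hw]
  have hfreq1 : ∀ x, (d.insert (a[u]'hulen) (d.getD (a[u]'hulen) 0 - 1)).getD x 0
      = ((mid.count x : Nat) : Int) := by
    intro x
    rw [PySem.Dict.getD_insert]
    by_cases hx : x = a[u]'hulen
    · subst hx
      rw [if_pos rfl, hd, hwin_u, List.count_cons_self]
      push_cast; ring
    · rw [if_neg hx, hd, hwin_u]
      simp [List.count_cons]
      exact fun h => hx h.symm
  have hpairs1 : p - (d.insert (a[u]'hulen) (d.getD (a[u]'hulen) 0 - 1)).getD (k - a[u]'hulen) 0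
      = (pc k mid : Int) := by
    rw [hp, hfreq1, hwin_u]
    simp only [pc]
    push_cast
    ring
  have hpairs2 : p - (d.insert (a[u]'hulen) (d.getD (a[u]'hulen) 0 - 1)).getD (k - a[u]'hulen) 0
        + (d.insert (a[u]'hulen) (d.getD (a[u]'hulen) 0 - 1)).getD (k - a[u + mN]'humlen) 0
      = (pc k (win a mN (u + 1)) : Int) := by
    rw [hpairs1, hfreq1, hwin_u1, pc_append_singleton]
    push_cast
    ring
  refine ⟨?_, ?_, ?_⟩
  · intro x
    rw [PySem.Dict.getD_insert]
    by_cases hx : x = a[u + mN]'humlen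
    · subst hx
      rw [if_pos rfl, hfreq1, hwin_u1]
      simp [List.count_append]
    · rw [if_neg hx, hfreq1, hwin_u1]
      simp [List.count_append, List.count_cons]
      exact fun h => hx h.symm
  · exact hpairs2
  · congr 1
    rw [hpairs2]
    by_cases hpb : hasPairB k (win a mN (u + 1)) = true
    · rw [if_pos hpb, if_pos ?_]
      have := (pc_pos_iff k (win a mN (u + 1))).mpr hpb
      omega
    · rw [if_neg ?_, if_neg (by simpa using hpb)]
      have : pc k (win a mN (u + 1)) = 0 := by
        by_contra hz
        exact hpb ((pc_pos_iff k (win a mN (u + 1))).mp (by omega))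
      rw [this]
      simp

lemma foldB2 (a : List Int) (m k : Int) (mN : Nat) (hm : 1 ≤ mN) (hmc : (mN : Int) = m) :
    ∀ u : Nat, u + mN ≤ a.length → ∀ (st0 : PySem.Dict Int Int × Int × Int),
    (∀ v, st0.1.getD v 0 = (((win a mN 0).count v : Nat) : Int)) →
    st0.2.1 = (pc k (win a mN 0) : Int) →
    (∀ v, ((PySem.List.pyRange 1 (1 + (u : Int)) 1).foldl (Bstep a m k) st0).1.getD v 0
        = (((win a mN u).count v : Nat) : Int)) ∧
    ((PySem.List.pyRange 1 (1 + (u : Int)) 1).foldl (Bstep a m k) st0).2.1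
        = (pc k (win a mN u) : Int) ∧
    ((PySem.List.pyRange 1 (1 + (u : Int)) 1).foldl (Bstep a m k) st0).2.2
        = st0.2.2 + ((List.range' 1 u).countP (fun s => hasPairB k (win a mN s)) : Int) := by
  intro u
  induction u with
  | zero =>
      intro hu st0 h1 h2
      rw [PySem.List.pyRange_one_eq_nil (by omega)]
      simpa using ⟨h1, h2⟩
  | succ u ih =>
      intro hu st0 h1 h2
      have hsp : PySem.List.pyRange 1 (1 + ((u + 1 : Nat) : Int)) 1
          = PySem.List.pyRange 1 (1 + (u : Int)) 1 ++ [((u + 1 : Nat) : Int)] := by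
        rw [show (1 + ((u + 1 : Nat) : Int)) = (1 + (u : Int)) + 1 by omega,
          PySem.List.pyRange_one_succ_right (by omega)]
        rw [show (1 + (u : Int)) = ((u + 1 : Nat) : Int) by omega]
      obtain ⟨g1, g2, g3⟩ := ih (by omega) st0 h1 h2
      rw [hsp, List.foldl_append]
      simp only [List.foldl_cons, List.foldl_nil]
      have hst := stepB a m k mN hm hmc u (by omega)
        ((PySem.List.pyRange 1 (1 + (u : Int)) 1).foldl (Bstep a m k) st0).1
        ((PySem.List.pyRange 1 (1 + (u : Int)) 1).foldl (Bstep a m k) st0).2.1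
        ((PySem.List.pyRange 1 (1 + (u : Int)) 1).foldl (Bstep a m k) st0).2.2
        g1 g2
      refine ⟨hst.1, hst.2.1, ?_⟩
      rw [hst.2.2, g3]
      have hrr : List.range' 1 (u + 1) = List.range' 1 u ++ [1 + u] := by
        have := List.range'_append (s := 1) (m := u) (n := 1) (step := 1)
        rw [List.range'_one, Nat.one_mul] at this
        exact this.symm
      rw [hrr, List.countP_append]
      have hone : (List.countP (fun s => hasPairB k (win a mN s)) [1 + u])
          = if hasPairB k (win a mN (u + 1)) then 1 else 0 := by
        rw [show 1 + u = u + 1 by omega]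
        simp [List.countP_cons]
      rw [hone]
      by_cases hpb : hasPairB k (win a mN (u + 1)) = true
      · rw [if_pos hpb, if_pos hpb]
        push_cast
        ring
      · rw [if_neg hpb, if_neg hpb]
        push_cast
        ring

lemma solution_alt_eq (a : List Int) (m k : Int) (mN : Nat) (hm : 1 ≤ mN) (hmN : (mN : Int) = m) :
    solution_alt a m k =
      ((List.range' 0 (a.length + 1 - mN)).countP (fun s => hasPairB k (win a mN s)) : Int) := by
  by_cases hbig : m > (a.length : Int)
  · have h0 : a.length + 1 - mN = 0 := by omega
    rw [h0]
    simp [solution_alt, hbig]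
  · have hmle : mN ≤ a.length := by omega
    show (if m > (a.length : Int) then (0 : Int) else
      ((PySem.List.pyRange 1 ((a.length : Int) - m + 1) 1).foldl (Bstep a m k)
        (((PySem.List.pyRange 0 m 1).foldl
            (fun (st : PySem.Dict Int Int × Int) j =>
              (st.1.insert (PySem.List.pyGetD a j 0) (st.1.getD (PySem.List.pyGetD a j 0) 0 + 1),
               st.2 + st.1.getD (k - PySem.List.pyGetD a j 0) 0))
            (PySem.Dict.empty, 0)).1,
         ((PySem.List.pyRange 0 m 1).foldl
            (fun (st : PySem.Dict Int Int × Int) j =>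
              (st.1.insert (PySem.List.pyGetD a j 0) (st.1.getD (PySem.List.pyGetD a j 0) 0 + 1),
               st.2 + st.1.getD (k - PySem.List.pyGetD a j 0) 0))
            (PySem.Dict.empty, 0)).2,
         if ((PySem.List.pyRange 0 m 1).foldl
            (fun (st : PySem.Dict Int Int × Int) j =>
              (st.1.insert (PySem.List.pyGetD a j 0) (st.1.getD (PySem.List.pyGetD a j 0) 0 + 1),
               st.2 + st.1.getD (k - PySem.List.pyGetD a j 0) 0))
            (PySem.Dict.empty, 0)).2 > 0 then (1 : Int) else 0)).2.2) = _
    rw [if_neg hbig]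
    have hfold1 : (PySem.List.pyRange 0 m 1).foldl
        (fun (st : PySem.Dict Int Int × Int) j =>
          (st.1.insert (PySem.List.pyGetD a j 0) (st.1.getD (PySem.List.pyGetD a j 0) 0 + 1),
           st.2 + st.1.getD (k - PySem.List.pyGetD a j 0) 0))
        (PySem.Dict.empty, 0)
      = (a.take mN).foldl
          (fun (st : PySem.Dict Int Int × Int) x =>
            (st.1.insert x (st.1.getD x 0 + 1), st.2 + st.1.getD (k - x) 0))
          (PySem.Dict.empty, 0) := by
      rw [show m = (((a.take mN).length : Nat) : Int) from by simp [List.length_take]; omega]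
      rw [PySem.List.foldl_congr_mem _ _
        (fun (st : PySem.Dict Int Int × Int) j =>
          (st.1.insert (PySem.List.pyGetD (a.take mN) j 0)
            (st.1.getD (PySem.List.pyGetD (a.take mN) j 0) 0 + 1),
           st.2 + st.1.getD (k - PySem.List.pyGetD (a.take mN) j 0) 0)) _ ?_]
      · exact PySem.List.foldl_pyRange_zero_pyGetD' (a.take mN) 0
          (fun (st : PySem.Dict Int Int × Int) x =>
            (st.1.insert x (st.1.getD x 0 + 1), st.2 + st.1.getD (k - x) 0)) _
      · intro acc x hx
        rw [PySem.List.mem_pyRange_one] at hx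
        have hxl : x.toNat < mN := by
          have : x < ((a.take mN).length : Int) := hx.2
          rw [List.length_take] at this
          omega
        have hpg : PySem.List.pyGetD a x 0 = PySem.List.pyGetD (a.take mN) x 0 := by
          rw [PySem.List.pyGetD_eq_getElem a 0 hx.1 (by omega),
            PySem.List.pyGetD_eq_getElem (a.take mN) 0 hx.1 (by rw [List.length_take]; push_cast; omega)]
          rw [List.getElem_take]
        rw [hpg]
    rw [hfold1]
    have hwin0 : win a mN 0 = a.take mN := by simp [win]
    obtain ⟨hc1, hc2⟩ := foldB1 k (a.take mN) PySem.Dict.empty 0 []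
      (fun v => by simp [PySem.Dict.getD_empty])
    have hc1' : ∀ v, ((a.take mN).foldl
        (fun (st : PySem.Dict Int Int × Int) x =>
          (st.1.insert x (st.1.getD x 0 + 1), st.2 + st.1.getD (k - x) 0))
        (PySem.Dict.empty, 0)).1.getD v 0 = (((win a mN 0).count v : Nat) : Int) := by
      intro v
      rw [hc1 v, hwin0]
      simp
    have hc2' : ((a.take mN).foldl
        (fun (st : PySem.Dict Int Int × Int) x =>
          (st.1.insert x (st.1.getD x 0 + 1), st.2 + st.1.getD (k - x) 0))
        (PySem.Dict.empty, 0)).2 = (pc k (win a mN 0) : Int) := by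
      rw [hc2, hwin0]
      simp [pc]
    set F1 := (a.take mN).foldl
        (fun (st : PySem.Dict Int Int × Int) x =>
          (st.1.insert x (st.1.getD x 0 + 1), st.2 + st.1.getD (k - x) 0))
        (PySem.Dict.empty, 0) with hF1
    set u : Nat := a.length - mN with hu
    rw [show (a.length : Int) - m + 1 = 1 + (u : Int) from by omega]
    obtain ⟨g1, g2, g3⟩ := foldB2 a m k mN hm hmN u (by omega)
      (F1.1, F1.2, if F1.2 > 0 then (1 : Int) else 0) hc1' hc2'
    rw [g3]
    have hcnt0 : (if F1.2 > 0 then (1 : Int) else 0)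
        = if hasPairB k (win a mN 0) then (1 : Int) else 0 := by
      rw [hc2']
      by_cases hpb : hasPairB k (win a mN 0) = true
      · rw [if_pos hpb, if_pos ?_]
        have := (pc_pos_iff k (win a mN 0)).mpr hpb
        omega
      · rw [if_neg ?_, if_neg (by simpa using hpb)]
        have : pc k (win a mN 0) = 0 := by
          by_contra hz
          exact hpb ((pc_pos_iff k (win a mN 0)).mp (by omega))
        rw [this]
        simp
    have hrr : List.range' 0 (a.length + 1 - mN) = 0 :: List.range' 1 u := by
      rw [show a.length + 1 - mN = u + 1 from by omega, List.range'_succ]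
    rw [hrr, List.countP_cons, hcnt0]
    by_cases hpb : hasPairB k (win a mN 0) = true
    · rw [if_pos hpb]
      simp only [hpb]
      push_cast
      ring
    · rw [if_neg hpb]
      simp only [Bool.not_eq_true] at hpb
      simp only [hpb]
      push_cast
      ring

-- ===== VERDICT (by name: the statement is the Claim_ definition above) =====
theorem solution_spec : Claim_equal_solution := by
  intro a m k _hdom hpre
  unfold Spec_solution
  have hm1 : 1 ≤ m := hpre
  set mN := m.toNat with hmN
  have hcast : (mN : Int) = m := by omega
  rw [solution_alt_eq a m k mN (by omega) hcast]
  show loopA a m k ((a.length : Int) - m + 1).toNat 0 = _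
  rw [← hcast]
  have := loopA_spec a mN k (by omega) ((a.length : Int) - (mN : Int) + 1).toNat 0 (by omega)
  simpa using this
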